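-- pv_equiv track=rewrite | github.com/syaofox/GPT-SoVITS | GPT_SoVITS/text/pinyin_ex.py | parse_special_string
-- ===== SOURCE A (Python) =====
-- punctuation = {'。', '，', '；', '：', '？', '！', '（', '）', '“', '”', '‘', '’', '《', '》', '.', ',', ';', ':', '?', '!', '(', ')', '"', "'", '<', '>'}
--
-- def parse_special_string(s):
--
--
--     result = []
--     i = 0
--     while i < len(s):
--         if s[i] == '{':
--             # 找到花括号的闭合部分
--             j = i
--             while j < len(s) and s[j] != '}':
--                 j += 1
--             if j < len(s):
--                 result[-1] += s[i:j+1]  # 将花括号部分合并到前一个字符上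
--                 i = j + 1
--             else:
--                 # 如果没有闭合花括号，按普通字符处理
--                 result.append(s[i])
--                 i += 1
--         else:
--             result.append(s[i])
--             i += 1
--
--     output_list = []
--
-- # 遍历原始列表
--     for item in result:
--         output_list.append(item)
--         if item not in punctuation:
--             output_list.append('')
--     return output_list
-- ===== SOURCE B (Python) =====
-- import re
--
-- punctuation = {'。', '，', '；', '：', '？', '！', '（', '）', '“', '”', '‘', '’', '《', '》', '.', ',', ';', ':', '?', '!', '(', ')', '"', "'", '<', '>'}
--
-- def parse_special_string(s):
--     # Tokenize in one shot: a token is either a closed brace group "{...}" or a single character.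
--     tokens = []
--     for tok in re.findall(r'\{[^}]*\}|[\s\S]', s):
--         if len(tok) > 1:          # closed brace group: attach to the previous token
--             tokens[-1] += tok
--         else:
--             tokens.append(tok)
--     return [x for item in tokens
--               for x in ((item,) if item in punctuation else (item, ''))]
-- ===== Notes on version B (the rewrite author's own statement) =====
-- stated objective: idiomatic
-- what changed: Replaces A's manual index-jumping while-loop scan (inner loop hunting for '}', slicing, in-place merge) with a one-shot regex tokenization into brace-group/single-char tokens followed by a simple merge pass, and replaces the second append loop with a flat comprehension.
import Mathlib
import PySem

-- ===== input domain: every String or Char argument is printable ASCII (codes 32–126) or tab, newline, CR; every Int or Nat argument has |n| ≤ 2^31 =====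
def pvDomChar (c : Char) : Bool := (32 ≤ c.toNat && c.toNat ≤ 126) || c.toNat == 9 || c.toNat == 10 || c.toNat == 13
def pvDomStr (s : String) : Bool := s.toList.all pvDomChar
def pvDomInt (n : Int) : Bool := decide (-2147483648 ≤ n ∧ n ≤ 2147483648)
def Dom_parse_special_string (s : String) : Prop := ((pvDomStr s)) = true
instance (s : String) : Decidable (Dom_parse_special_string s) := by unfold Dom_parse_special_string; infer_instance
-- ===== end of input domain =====

-- B replaces A's index-jumping scan by regex-style tokenization + merge pass + flat comprehension (idiomatic, same cost).
-- Both Pythons raise IndexError on a leading closed brace group; Pre_ excludes exactly those inputs.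

-- shared module constant of A's file, used identically by both sides
def pvPunct : List String :=
  ["。", "，", "；", "：", "？", "！", "（", "）", "“", "”", "‘", "’", "《", "》",
   ".", ",", ";", ":", "?", "!", "(", ")", "\"", "'", "<", ">"]

-- ===== PORT A =====
-- A's while loop over index i, as structural recursion on the remaining characters,
-- with `result` threaded in Python's forward order (result[-1] += … / result.append).
def pvLoopA : List Char → List String → List String
  | [], res => res
  | c :: rest, res =>
    if c = '{' then
      if '}' ∈ rest then          -- inner while found a closing brace (j < len(s))
        match res with
        | [] => []                -- Python: result[-1] raises IndexError (excluded by Pre_)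
        | _ :: _ =>
          pvLoopA ((rest.dropWhile (· ≠ '}')).drop 1)
            (res.dropLast ++ [res.getLast! ++ String.ofList ('{' :: rest.takeWhile (· ≠ '}') ++ ['}'])])
      else pvLoopA rest (res ++ [String.ofList [c]])
    else pvLoopA rest (res ++ [String.ofList [c]])
termination_by cs _ => cs.length
decreasing_by
  · have h1 : (rest.dropWhile (· ≠ '}')).length ≤ rest.length := List.length_dropWhile_le _ _
    have h2 : ((rest.dropWhile (· ≠ '}')).drop 1).length = (rest.dropWhile (· ≠ '}')).length - 1 :=
      List.length_drop
    simp only [List.length_cons]; omega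
  · simp
  · simp

def parse_special_string (s : String) : List String :=
  let result := pvLoopA s.toList []
  result.foldl (fun output_list item =>
    let output_list := output_list ++ [item]
    if item ∈ pvPunct then output_list else output_list ++ [""]) []

-- ===== PORT B =====
-- re.findall(r'\{[^}]*\}|[\s\S]', s): either a closed brace group or a single character
def pvTokens : List Char → List String
  | [] => []
  | c :: rest =>
    if c = '{' ∧ '}' ∈ rest then
      String.ofList ('{' :: rest.takeWhile (· ≠ '}') ++ ['}']) :: pvTokens ((rest.dropWhile (· ≠ '}')).drop 1)
    else String.ofList [c] :: pvTokens rest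
termination_by cs => cs.length
decreasing_by
  · have h1 : (rest.dropWhile (· ≠ '}')).length ≤ rest.length := List.length_dropWhile_le _ _
    have h2 : ((rest.dropWhile (· ≠ '}')).drop 1).length = (rest.dropWhile (· ≠ '}')).length - 1 :=
      List.length_drop
    simp only [List.length_cons]; omega
  · simp

-- `tokens[-1] += tok` / `tokens.append(tok)`, with the list kept reversed in the accumulator
def pvMergeStep (acc : List String) (t : String) : List String :=
  if t.length > 1 then
    match acc with
    | h :: tl => (h ++ t) :: tl
    | [] => [t]                  -- Python: tokens[-1] raises IndexError (excluded by Pre_)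
  else t :: acc

def parse_special_string_alt (s : String) : List String :=
  let tokens := ((pvTokens s.toList).foldl pvMergeStep []).reverse
  tokens.flatMap (fun item => if item ∈ pvPunct then [item] else [item, ""])

-- ===== PRECONDITION & SPEC =====
-- Pre_ excludes exactly the inputs where both Pythons raise IndexError:
-- a string starting with '{' whose brace group is closed (a '}' later in the string).
def Pre_parse_special_string (s : String) : Prop :=
  ¬ (s.toList.head? = some '{' ∧ '}' ∈ s.toList.tail)
instance (s : String) : Decidable (Pre_parse_special_string s) := by
  unfold Pre_parse_special_string; infer_instance
def pvWitness_parse_special_string : String := "a{b}c."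
def Spec_parse_special_string (s : String) (out : List String) : Prop := out = parse_special_string_alt s
instance (s : String) (out : List String) : Decidable (Spec_parse_special_string s out) := by unfold Spec_parse_special_string; infer_instance

-- ===== CLAIM (what is proved, stated in full; the proofs are below) =====
def Claim_equal_parse_special_string : Prop := ∀ (s : String), Dom_parse_special_string s → Pre_parse_special_string s → Spec_parse_special_string s (parse_special_string s)

-- ===== LEMMAS AND PROOFS =====

-- phase 2: A's append loop equals B's flatMap
theorem pvPhase2 (l init : List String) :
    l.foldl (fun output_list item =>
      let output_list := output_list ++ [item]
      if item ∈ pvPunct then output_list else output_list ++ [""]) init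
    = init ++ l.flatMap (fun item => if item ∈ pvPunct then [item] else [item, ""]) := by
  induction l generalizing init with
  | nil => simp
  | cons h t ih =>
    simp only [List.foldl_cons, List.flatMap_cons, ih]
    by_cases hp : h ∈ pvPunct <;> simp [hp]

-- phase 1: A's inline-merging scan equals B's tokenize-then-merge, for any nonempty-or-safe state
theorem pvLastBang (r : String) (rs : List String) :
    (r :: rs).getLast! = (r :: rs).getLast (by simp) := by
  induction rs generalizing r with
  | nil => rfl
  | cons x xs ih => rw [List.getLast_cons (by simp)]; exact ih x

theorem pvRevCons (r : String) (rs : List String) :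
    (r :: rs).reverse = (r :: rs).getLast! :: (r :: rs).dropLast.reverse := by
  conv_lhs => rw [← List.dropLast_concat_getLast (l := r :: rs) (by simp)]
  rw [List.reverse_append, pvLastBang]
  simp

theorem pvPhase1 (cs : List Char) (res : List String)
    (hsafe : res = [] → ¬ (cs.head? = some '{' ∧ '}' ∈ cs.tail)) :
    pvLoopA cs res = ((pvTokens cs).foldl pvMergeStep res.reverse).reverse := by
  induction cs using pvTokens.induct generalizing res with
  | case1 => simp [pvLoopA, pvTokens]
  | case2 c rest h ih =>
    obtain ⟨hc, hm⟩ := h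
    subst hc
    match res with
    | [] => exact absurd ⟨rfl, hm⟩ (hsafe rfl)
    | r :: rs =>
      have hlen : (String.ofList ('{' :: rest.takeWhile (· ≠ '}') ++ ['}'])).length > 1 := by
        simp
      rw [pvLoopA, pvTokens]
      simp only [hm, if_true, and_self, List.foldl_cons]
      rw [pvRevCons, ih _ (by simp)]
      simp only [pvMergeStep, if_pos hlen]
      congr 1
      simp
  | case3 c rest h ih =>
    have hone : ¬ (String.ofList [c]).length > 1 := by simp
    by_cases hc : c = '{'
    · subst hc
      have hm : ¬ '}' ∈ rest := fun hmem => h ⟨rfl, hmem⟩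
      rw [pvLoopA.eq_def, pvTokens.eq_def]
      simp only [hm, reduceIte]
      rw [ih _ (by simp)]
      simp [pvMergeStep, hone]
    · have hna : ¬ ((c = '{') ∧ '}' ∈ rest) := fun hx => hc hx.1
      rw [pvLoopA.eq_def, pvTokens.eq_def]
      simp only [if_neg hc, if_neg hna, List.foldl_cons]
      rw [ih _ (by simp)]
      simp [pvMergeStep]

-- ===== VERDICT (by name: the statement is the Claim_ definition above) =====
theorem parse_special_string_spec : Claim_equal_parse_special_string := by
  intro s _ hpre
  unfold Spec_parse_special_string parse_special_string parse_special_string_alt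
  rw [pvPhase1 s.toList [] (fun _ => hpre), pvPhase2]
  simp
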